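-- pv_equiv track=rewrite | github.com/gjalt-h/BScAI_thesis2022_usefulness_stereotypes | usefulness_groups.py | att_occ_counter
-- ===== SOURCE A (Python) =====
-- def att_occ_counter(iteration):
--     counters= [0,0,0]
--     for alien in iteration:
--         for attribute in alien:
--             if attribute < 16:
--                 counters[0] += 1
--             elif attribute < 32:
--                 counters[1] += 1
--             else:
--                 counters[2] += 1
--     return counters
-- ===== SOURCE B (Python) =====
-- def att_occ_counter(iteration):
--     flat = [a for alien in iteration for a in alien]
--     return [sum(1 for a in flat if a < 16),
--             sum(1 for a in flat if 16 <= a < 32),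
--             sum(1 for a in flat if a >= 32)]
-- ===== Notes on version B (the rewrite author's own statement) =====
-- stated objective: idiomatic
-- what changed: Replaced the single nested loop mutating a counter list with a flatten followed by three independent counting comprehensions, one per bin.
import Mathlib
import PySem

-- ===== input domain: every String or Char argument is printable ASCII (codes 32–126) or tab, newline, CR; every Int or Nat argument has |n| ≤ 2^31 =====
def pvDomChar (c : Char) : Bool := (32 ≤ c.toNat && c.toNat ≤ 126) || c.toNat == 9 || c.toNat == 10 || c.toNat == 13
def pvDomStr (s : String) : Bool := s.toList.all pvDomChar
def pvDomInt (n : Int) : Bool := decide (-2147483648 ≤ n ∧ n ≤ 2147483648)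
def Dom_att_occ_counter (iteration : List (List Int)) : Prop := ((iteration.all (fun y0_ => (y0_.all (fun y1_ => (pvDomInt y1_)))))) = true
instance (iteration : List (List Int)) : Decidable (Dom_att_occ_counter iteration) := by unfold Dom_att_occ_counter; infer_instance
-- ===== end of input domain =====

-- B flattens once and counts each bin with an independent counting pass (idiomatic); A keeps one mutable 3-counter list through a single nested loop.

-- ===== PORT A =====
-- inner loop body of A: mutate counters[i] += 1 according to the branch
def attStep (counters : List Int) (att : Int) : List Int :=
  if att < 16 then counters.set 0 (counters.getD 0 0 + 1)
  else if att < 32 then counters.set 1 (counters.getD 1 0 + 1)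
  else counters.set 2 (counters.getD 2 0 + 1)

def att_occ_counter (iteration : List (List Int)) : List Int :=
  iteration.foldl (fun counters alien => alien.foldl attStep counters) [0, 0, 0]

-- ===== PORT B =====
def att_occ_counter_alt (iteration : List (List Int)) : List Int :=
  let flat := iteration.flatMap (fun alien => alien)
  [(flat.countP (fun a => a < 16) : Int),
   (flat.countP (fun a => 16 ≤ a ∧ a < 32) : Int),
   (flat.countP (fun a => 32 ≤ a) : Int)]

-- ===== PRECONDITION & SPEC =====
def Spec_att_occ_counter (iteration : List (List Int)) (out : List Int) : Prop := out = att_occ_counter_alt iteration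
instance (iteration : List (List Int)) (out : List Int) : Decidable (Spec_att_occ_counter iteration out) := by unfold Spec_att_occ_counter; infer_instance

-- ===== CLAIM (what is proved, stated in full; the proofs are below) =====
def Claim_equal_att_occ_counter : Prop := ∀ (iteration : List (List Int)), Dom_att_occ_counter iteration → Spec_att_occ_counter iteration (att_occ_counter iteration)

-- ===== LEMMAS AND PROOFS =====

lemma attStep_inner (alien : List Int) (a b c : Int) :
    alien.foldl attStep [a, b, c] =
      [a + (alien.countP (fun x => decide (x < 16)) : Int),
       b + (alien.countP (fun x => decide (16 ≤ x ∧ x < 32)) : Int),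
       c + (alien.countP (fun x => decide (32 ≤ x)) : Int)] := by
  induction alien generalizing a b c with
  | nil => simp
  | cons x xs ih =>
    by_cases h1 : x < 16
    · have hs : attStep [a, b, c] x = [a + 1, b, c] := by simp [attStep, h1]
      simp only [List.foldl_cons, hs, ih, List.countP_cons, List.cons.injEq, and_true]
      have e1 : decide (x < 16) = true := by simp [h1]
      have e2 : decide (16 ≤ x ∧ x < 32) = false := by simp; omega
      have e3 : decide (32 ≤ x) = false := by simp; omega
      rw [e1, e2, e3]; simp; omega
    · by_cases h2 : x < 32
      · have hs : attStep [a, b, c] x = [a, b + 1, c] := by simp [attStep, h1, h2]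
        simp only [List.foldl_cons, hs, ih, List.countP_cons, List.cons.injEq, and_true]
        have e1 : decide (x < 16) = false := by simp [h1]
        have e2 : decide (16 ≤ x ∧ x < 32) = true := by simp; omega
        have e3 : decide (32 ≤ x) = false := by simp; omega
        rw [e1, e2, e3]; simp; omega
      · have hs : attStep [a, b, c] x = [a, b, c + 1] := by simp [attStep, h1, h2]
        simp only [List.foldl_cons, hs, ih, List.countP_cons, List.cons.injEq, and_true]
        have e1 : decide (x < 16) = false := by simp [h1]
        have e2 : decide (16 ≤ x ∧ x < 32) = false := by simp; omega
        have e3 : decide (32 ≤ x) = true := by simp; omega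
        rw [e1, e2, e3]; simp; omega

lemma att_outer (iteration : List (List Int)) (a b c : Int) :
    iteration.foldl (fun counters alien => alien.foldl attStep counters) [a, b, c] =
      [a + ((iteration.flatMap (fun alien => alien)).countP (fun x => decide (x < 16)) : Int),
       b + ((iteration.flatMap (fun alien => alien)).countP (fun x => decide (16 ≤ x ∧ x < 32)) : Int),
       c + ((iteration.flatMap (fun alien => alien)).countP (fun x => decide (32 ≤ x)) : Int)] := by
  induction iteration generalizing a b c with
  | nil => simp
  | cons al rest ih =>
    simp only [List.foldl_cons, attStep_inner, ih, List.flatMap_cons, List.countP_append,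
      List.cons.injEq, and_true]
    push_cast
    omega

-- ===== VERDICT (by name: the statement is the Claim_ definition above) =====
theorem att_occ_counter_spec : Claim_equal_att_occ_counter := by
  intro iteration _
  show att_occ_counter iteration = att_occ_counter_alt iteration
  simp only [att_occ_counter, att_occ_counter_alt, att_outer]
  simp
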